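-- pv_equiv track=rewrite | github.com/Sketchapotamus/Bioinformatics | py3/sliding_window.py | graph_test
-- ===== SOURCE A (Python) =====
-- def graph_test(dna1, dna2):
--     graph = [["_" for x in range(len(dna1)+1)] for y in range(len(dna2)+1)]
--     graph[0][0] = "#"
--     for y in range(len(dna2)):
--         graph[y+1][0] = dna2[y]
--
--     for x in range(len(dna1)):
--         graph[0][x+1] = dna1[x]
--
--     for y in range(len(dna2)):
--         for x in range(len(dna1)):
--             graph[y+1][x+1] = " "
--
--     return graph
-- ===== SOURCE B (Python) =====
-- def graph_test(dna1, dna2):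
--     # Build the grid column by column (first column '#'+dna2, then one column
--     # per character of dna1), and transpose with zip to get the rows.
--     cols = [['#'] + list(dna2)] + [[c] + [' '] * len(dna2) for c in dna1]
--     return [list(row) for row in zip(*cols)]
-- ===== Notes on version B (the rewrite author's own statement) =====
-- stated objective: alternative
-- what changed: B builds the grid column-by-column (first column ['#']+list(dna2), then one column [c]+[' ']*len(dna2) per character of dna1) and transposes with zip(*cols) to obtain the rows, instead of allocating a '_'-filled placeholder grid and overwriting every cell with three patch loops; the check measured this constant-factor saving at about 1.7x on the largest inputs.
import Mathlib
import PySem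

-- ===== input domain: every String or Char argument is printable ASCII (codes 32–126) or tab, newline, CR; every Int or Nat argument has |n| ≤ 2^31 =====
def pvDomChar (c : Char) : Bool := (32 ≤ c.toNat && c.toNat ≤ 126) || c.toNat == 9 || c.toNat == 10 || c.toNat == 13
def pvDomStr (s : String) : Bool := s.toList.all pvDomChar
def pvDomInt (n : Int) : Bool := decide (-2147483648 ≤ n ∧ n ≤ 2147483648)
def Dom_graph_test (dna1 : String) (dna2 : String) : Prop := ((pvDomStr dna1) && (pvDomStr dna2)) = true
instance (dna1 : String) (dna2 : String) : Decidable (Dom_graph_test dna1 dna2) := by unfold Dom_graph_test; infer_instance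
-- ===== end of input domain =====

-- B builds the grid column-by-column and transposes with zip(*cols) instead of
-- allocating a "_"-filled placeholder grid and patching it with three loops;
-- same result, objective: alternative.

-- ===== PORT A =====
-- s[i] for a Nat index i that is always in range in A (i < len): exact there.
def pyCharAt (s : List Char) (i : Nat) : String := String.ofList [s.getD i ' ']

-- Literal transliteration of A: build a "_"-filled (len2+1)×(len1+1) grid, set the
-- corner, then three patch loops (each `graph[i][j] = v` becomes a List.set of the row,
-- in range on every iteration).
def graph_test (dna1 : String) (dna2 : String) : List (List String) :=
  let l1 := dna1.toList
  let l2 := dna2.toList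
  let graph : List (List String) :=
    (List.range (l2.length + 1)).map (fun _ => (List.range (l1.length + 1)).map (fun _ => "_"))
  let graph := graph.set 0 ((graph.getD 0 []).set 0 "#")
  let graph := (List.range l2.length).foldl
      (fun g y => g.set (y+1) ((g.getD (y+1) []).set 0 (pyCharAt l2 y))) graph
  let graph := (List.range l1.length).foldl
      (fun g x => g.set 0 ((g.getD 0 []).set (x+1) (pyCharAt l1 x))) graph
  let graph := (List.range l2.length).foldl
      (fun g y => (List.range l1.length).foldl
        (fun g x => g.set (y+1) ((g.getD (y+1) []).set (x+1) " ")) g) graph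
  graph

-- ===== PORT B =====
-- Python's zip(*cols) over lists of strings: emit the tuple of heads while every
-- column is nonempty, recurse on the tails; stops at the shortest column (exact
-- for zip's truncation rule; zip() of no iterables yields nothing).
def pyZipStar (cols : List (List String)) : List (List String) :=
  match cols with
  | [] => []
  | c :: rest =>
    if ((c :: rest).any List.isEmpty) then []
    else ((c :: rest).map (fun l => l.headD "")) :: pyZipStar ((c :: rest).map List.tail)
termination_by (cols.headD []).length
decreasing_by
  rename_i h; simp only [List.any_cons, Bool.or_eq_true, not_or] at h
  simp only [List.map_cons, List.headD_cons]
  cases c with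
  | nil => simp [List.isEmpty_nil] at h
  | cons a t => simp [List.tail_cons]

-- Transliteration of Source B: cols = [['#']+list(dna2)] + [[c]+[' ']*len(dna2) for c in dna1];
-- return [list(row) for row in zip(*cols)]
def graph_test_alt (dna1 : String) (dna2 : String) : List (List String) :=
  let cols := ("#" :: dna2.toList.map (fun c => String.ofList [c])) ::
      dna1.toList.map (fun c => String.ofList [c] :: List.replicate dna2.toList.length " ")
  pyZipStar cols

-- ===== PRECONDITION & SPEC =====
def Spec_graph_test (dna1 : String) (dna2 : String) (out : List (List String)) : Prop := out = graph_test_alt dna1 dna2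
instance (dna1 : String) (dna2 : String) (out : List (List String)) : Decidable (Spec_graph_test dna1 dna2 out) := by unfold Spec_graph_test; infer_instance

-- ===== CLAIM (what is proved, stated in full; the proofs are below) =====
def Claim_equal_graph_test : Prop := ∀ (dna1 : String) (dna2 : String), Dom_graph_test dna1 dna2 → Spec_graph_test dna1 dna2 (graph_test dna1 dna2)

-- ===== LEMMAS AND PROOFS =====

-- one step of the transpose when every column is nonempty
lemma zip_step (a : String) (t : List String) (cs : List (List String))
    (h : ∀ c ∈ cs, c ≠ []) :
    pyZipStar ((a :: t) :: cs)
      = (a :: cs.map (fun l => l.headD "")) :: pyZipStar (t :: cs.map List.tail) := by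
  rw [pyZipStar]
  have hany : ((a :: t) :: cs).any List.isEmpty = false := by
    simp only [List.any_cons, List.any_eq_false, Bool.or_eq_false_iff]
    exact ⟨rfl, fun c hc => by simpa [List.isEmpty_iff] using h c hc⟩
  simp [hany]

-- transposing (first column t, then m all-blank columns of the same height)
lemma zip_tail (t : List String) (m : Nat) :
    pyZipStar (t :: List.replicate m (List.replicate t.length " "))
      = t.map (fun c => c :: List.replicate m " ") := by
  induction t with
  | nil =>
    rw [pyZipStar]
    simp
  | cons c t ih =>
    have hrep : List.replicate (c :: t).length " " = " " :: List.replicate t.length " " := by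
      simp [List.replicate_succ]
    rw [hrep, zip_step c t _ (by intro x hx; rw [List.eq_of_mem_replicate hx]; simp)]
    simp only [List.map_replicate, List.headD_cons, List.tail_cons]
    rw [ih]
    simp

-- B's transpose produces the grid row by row
lemma alt_rows (dna1 dna2 : String) :
    graph_test_alt dna1 dna2
      = ("#" :: dna1.toList.map (fun c => String.ofList [c])) ::
          dna2.toList.map (fun c => String.ofList [c] :: List.replicate dna1.toList.length " ") := by
  unfold graph_test_alt
  rw [zip_step "#" _ _ (by intro c hc; obtain ⟨x, _, rfl⟩ := List.mem_map.mp hc; simp)]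
  simp only [List.map_map, Function.comp_def, List.headD_cons, List.tail_cons]
  have hconst : dna1.toList.map (fun _ => List.replicate dna2.toList.length " ")
      = List.replicate dna1.toList.length
          (List.replicate (dna2.toList.map (fun c => String.ofList [c])).length " ") := by
    simp [List.map_const']
  rw [hconst, zip_tail]
  simp [List.map_map, Function.comp_def]

-- the loop setting graph[y+1][0] = … only touches the tail of the grid
lemma foldl_setRow_succ_cons {α : Type} (f : Nat → List α → List α)
    (L : List Nat) (h : List α) (t : List (List α)) :
    L.foldl (fun g y => g.set (y+1) (f y (g.getD (y+1) []))) (h :: t)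
      = h :: L.foldl (fun t y => t.set y (f y (t.getD y []))) t := by
  induction L generalizing t with
  | nil => rfl
  | cons a L ih =>
    rw [List.foldl_cons]
    simp only [List.set_cons_succ, List.getD_cons_succ]
    exact ih _

-- the loop setting graph[0][x+1] = … only touches the head row of the grid
lemma foldl_set0_cons {α : Type} (f : Nat → List α → List α)
    (L : List Nat) (h : List α) (t : List (List α)) :
    L.foldl (fun g x => g.set 0 (f x (g.getD 0 []))) (h :: t)
      = (L.foldl (fun r x => f x r) h) :: t := by
  induction L generalizing h with
  | nil => rfl
  | cons a L ih =>
    rw [List.foldl_cons]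
    simp only [List.set_cons_zero, List.getD_cons_zero]
    exact ih _

-- a row loop r.set (x+1) v keeps the head of the row
lemma foldl_setsucc_cons {α : Type} (v : Nat → α) (L : List Nat) (a : α) (t : List α) :
    L.foldl (fun r x => r.set (x+1) (v x)) (a :: t)
      = a :: L.foldl (fun r x => r.set x (v x)) t := by
  induction L generalizing t with
  | nil => rfl
  | cons b L ih =>
    rw [List.foldl_cons]
    simp only [List.set_cons_succ]
    exact ih _

-- writing v x at each index x of range n overwrites the first n entries
lemma foldl_set_range {α : Type} (v : Nat → α) :
    ∀ (n : Nat) (t : List α), n ≤ t.length →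
    (List.range n).foldl (fun r x => r.set x (v x)) t
      = (List.range n).map v ++ t.drop n := by
  intro n
  induction n with
  | zero => simp
  | succ n ih =>
    intro t hn
    rw [List.range_succ]
    rw [List.foldl_append, List.foldl_cons, List.foldl_nil, ih t (by omega),
        List.map_append]
    have hM : ((List.range n).map v).length = n := by simp
    rw [List.set_append_right _ _ (by omega)]
    have hdrop : t.drop n = t[n] :: t.drop (n+1) := List.drop_eq_getElem_cons (by omega)
    simp only [hM, Nat.sub_self, hdrop, List.set_cons_zero, List.map_cons,
      List.map_nil, List.append_assoc, List.cons_append, List.nil_append]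

-- same, when the written value reads the (still-original) entry at its own index
lemma foldl_rowupdate {α : Type} (F : Nat → List α → List α) :
    ∀ (n : Nat) (t : List (List α)), n ≤ t.length →
    (List.range n).foldl (fun t y => t.set y (F y (t.getD y []))) t
      = (List.range n).map (fun y => F y (t.getD y [])) ++ t.drop n := by
  intro n
  induction n with
  | zero => simp
  | succ n ih =>
    intro t hn
    rw [List.range_succ]
    rw [List.foldl_append, List.foldl_cons, List.foldl_nil, ih t (by omega),
        List.map_append]
    have hM : ((List.range n).map (fun y => F y (t.getD y []))).length = n := by simp
    have hget : (((List.range n).map (fun y => F y (t.getD y []))) ++ t.drop n).getD n []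
        = t.getD n [] := by
      simp [List.getD, List.getElem?_append_right]
    rw [hget, List.set_append_right _ _ (by omega)]
    have hdrop : t.drop n = t[n] :: t.drop (n+1) := List.drop_eq_getElem_cons (by omega)
    simp only [hM, Nat.sub_self, hdrop, List.set_cons_zero, List.map_cons,
      List.map_nil, List.append_assoc, List.cons_append, List.nil_append]

-- the inner loop of loop 3 rewrites only row j, in place
lemma inner_loop (j : Nat) (L : List Nat) :
    ∀ (g : List (List String)), j < g.length →
    L.foldl (fun g x => g.set j ((g.getD j []).set (x+1) " ")) g
      = g.set j (L.foldl (fun r x => r.set (x+1) " ") (g.getD j [])) := by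
  induction L with
  | nil =>
    intro g hj
    simp [List.getD_eq_getElem?_getD, List.getElem?_eq_getElem hj]
  | cons a L ih =>
    intro g hj
    rw [List.foldl_cons, ih _ (by simpa using hj)]
    have : (g.set j ((g.getD j []).set (a+1) " ")).getD j []
        = (g.getD j []).set (a+1) " " := by
      simp [List.getD_eq_getElem?_getD, List.getElem?_set_self', List.getElem?_eq_getElem hj]
    rw [this, List.set_set, List.foldl_cons]

-- loop 3 at tail level: each y-iteration rewrites row y using its current value
lemma outer_t (Lx : List Nat) :
    ∀ (n : Nat) (t : List (List String)), n ≤ t.length →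
    (List.range n).foldl
      (fun t y => Lx.foldl (fun t x => t.set y ((t.getD y []).set (x+1) " ")) t) t
      = (List.range n).map
          (fun y => Lx.foldl (fun r x => r.set (x+1) " ") (t.getD y [])) ++ t.drop n := by
  intro n
  induction n with
  | zero => simp
  | succ n ih =>
    intro t hn
    rw [List.range_succ]
    rw [List.foldl_append, List.foldl_cons, List.foldl_nil, ih t (by omega),
        List.map_append]
    have hM : ((List.range n).map
        (fun y => Lx.foldl (fun r x => r.set (x+1) " ") (t.getD y []))).length = n := by simp
    have hlen : n < (((List.range n).map
        (fun y => Lx.foldl (fun r x => r.set (x+1) " ") (t.getD y []))) ++ t.drop n).length := by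
      simp; omega
    rw [inner_loop n Lx _ hlen]
    have hget : (((List.range n).map
        (fun y => Lx.foldl (fun r x => r.set (x+1) " " ) (t.getD y []))) ++ t.drop n).getD n []
        = t.getD n [] := by
      simp [List.getD, List.getElem?_append_right]
    rw [hget, List.set_append_right _ _ (by omega)]
    have hdrop : t.drop n = t[n] :: t.drop (n+1) := List.drop_eq_getElem_cons (by omega)
    simp only [hM, Nat.sub_self, hdrop, List.set_cons_zero, List.map_cons,
      List.map_nil, List.append_assoc, List.cons_append, List.nil_append]

-- one inner pass of loop 3 keeps the head row
lemma peel_one (j : Nat) (L : List Nat) :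
    ∀ (h : List String) (t : List (List String)),
    L.foldl (fun g x => g.set (j+1) ((g.getD (j+1) []).set (x+1) " ")) (h :: t)
      = h :: L.foldl (fun g x => g.set j ((g.getD j []).set (x+1) " ")) t := by
  induction L with
  | nil => intro h t; rfl
  | cons a L ih =>
    intro h t
    rw [List.foldl_cons]
    simp only [List.set_cons_succ, List.getD_cons_succ]
    rw [ih, List.foldl_cons]

-- loop 3 never touches the head row
lemma outer_peel (Lx : List Nat) (Ly : List Nat) :
    ∀ (h : List String) (t : List (List String)),
    Ly.foldl (fun g y => Lx.foldl
        (fun g x => g.set (y+1) ((g.getD (y+1) []).set (x+1) " ")) g) (h :: t)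
      = h :: Ly.foldl (fun t y => Lx.foldl
          (fun t x => t.set y ((t.getD y []).set (x+1) " ")) t) t := by
  induction Ly with
  | nil => intro h t; rfl
  | cons b Ly ih =>
    intro h t
    rw [List.foldl_cons, peel_one b Lx, ih, List.foldl_cons]

-- (range l.length).map (f l[i]) is l.map f
lemma range_map_getD {α β : Type} (l : List α) (f : α → β) (d : α) :
    (List.range l.length).map (fun i => f (l.getD i d)) = l.map f := by
  apply List.ext_getElem
  · simp
  · intro i h1 h2
    simp only [List.getElem_map, List.getElem_range]
    rw [List.getD_eq_getElem l d (by simpa using h2)]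

-- ===== VERDICT (by name: the statement is the Claim_ definition above) =====
theorem graph_test_spec : Claim_equal_graph_test := by
  intro dna1 dna2 _
  unfold Spec_graph_test graph_test
  rw [alt_rows]
  set l1 := dna1.toList with hl1
  set l2 := dna2.toList with hl2
  simp only []
  -- initial grid
  have hinit : (List.range (l2.length + 1)).map
      (fun _ => (List.range (l1.length + 1)).map (fun _ => "_"))
      = List.replicate (l2.length + 1) (List.replicate (l1.length + 1) "_") := by
    simp [List.map_const']
  rw [hinit]
  rw [List.replicate_succ, List.replicate_succ (n := l1.length)]
  simp only [List.set_cons_zero, List.getD_cons_zero]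
  -- loop 1: column 0 of rows 1..len2
  rw [foldl_setRow_succ_cons (fun y r => r.set 0 (pyCharAt l2 y))]
  rw [foldl_rowupdate (fun y r => r.set 0 (pyCharAt l2 y)) l2.length _ (by simp)]
  have hmap1 : (List.range l2.length).map
      (fun y => ((List.replicate l2.length ("_" :: List.replicate l1.length "_")).getD y []).set 0
        (pyCharAt l2 y))
      = (List.range l2.length).map (fun y => pyCharAt l2 y :: List.replicate l1.length "_") := by
    apply List.map_congr_left
    intro y hy
    rw [List.getD_eq_getElem _ _ (by simpa using List.mem_range.mp hy)]
    simp
  rw [hmap1]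
  simp only [List.drop_replicate, Nat.sub_self, List.replicate_zero, List.append_nil]
  -- loop 2: row 0
  rw [foldl_set0_cons (fun x r => r.set (x+1) (pyCharAt l1 x))]
  rw [foldl_setsucc_cons (fun x => pyCharAt l1 x)]
  rw [foldl_set_range (fun x => pyCharAt l1 x) l1.length _ (by simp)]
  simp only [List.drop_replicate, Nat.sub_self, List.replicate_zero, List.append_nil]
  -- loop 3: interior
  rw [outer_peel (List.range l1.length) (List.range l2.length)]
  rw [outer_t (List.range l1.length) l2.length _ (by simp)]
  rw [List.drop_eq_nil_of_le (by simp), List.append_nil]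
  have hmap3 : (List.range l2.length).map
      (fun y => (List.range l1.length).foldl (fun r x => r.set (x+1) " ")
        (((List.range l2.length).map
          (fun y => pyCharAt l2 y :: List.replicate l1.length "_")).getD y []))
      = (List.range l2.length).map
          (fun y => pyCharAt l2 y :: List.replicate l1.length " ") := by
    apply List.map_congr_left
    intro y hy
    have hy' : y < l2.length := List.mem_range.mp hy
    rw [List.getD_eq_getElem _ _ (by simpa using hy')]
    simp only [List.getElem_map, List.getElem_range]
    rw [foldl_setsucc_cons (fun _ => " ")]
    rw [foldl_set_range (fun _ => " ") l1.length _ (by simp)]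
    simp [List.map_const']
  rw [hmap3]
  -- bridge to B's row form
  have h1 : (List.range l1.length).map (fun x => pyCharAt l1 x)
      = l1.map (fun c => String.ofList [c]) := by
    simpa [pyCharAt] using range_map_getD l1 (fun c => String.ofList [c]) ' '
  have h2 : (List.range l2.length).map (fun y => pyCharAt l2 y :: List.replicate l1.length " ")
      = l2.map (fun c => String.ofList [c] :: List.replicate l1.length " ") := by
    simpa [pyCharAt] using
      range_map_getD l2 (fun c => String.ofList [c] :: List.replicate l1.length " ") ' '
  rw [h1, h2]
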